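-- pv_equiv track=rewrite | github.com/yuinaz/discord-bot-railway | satpambot/bot/modules/discord_bot/cogs/a08_xp_ladder_reporter_overlay.py | _calc_kuliah
-- ===== SOURCE A (Python) =====
-- from typing import Dict, Tuple, Optional
--
-- def _calc_kuliah(total: int, mapping: Dict[str,int]) -> Tuple[str, int, int, int]:
--     # returns (stage_name, lower, upper, pct)
--     pairs = []
--     for name, thr in mapping.items():
--         try:
--             pairs.append((name, int(thr)))
--         except Exception:
--             continue
--     pairs.sort(key=lambda x: x[1])
--     stage = pairs[0][0]
--     low = 0
--     high = pairs[0][1]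
--     for i, (name, thr) in enumerate(pairs):
--         if total >= thr:
--             stage = name
--             low = thr
--             high = pairs[i+1][1] if i+1 < len(pairs) else thr
--         else:
--             high = thr
--             break
--     denom = max(1, (high - low))
--     pct = max(0, min(100, int((total - low) * 100 / denom)))
--     return stage, low, high, pct
-- ===== SOURCE B (Python) =====
-- def _calc_kuliah(total: int, mapping) -> tuple:
--     # returns (stage_name, lower, upper, pct)
--     pairs = sorted(((name, int(thr)) for name, thr in mapping.items()),
--                    key=lambda p: p[1])
--     # binary search: k = number of thresholds <= total (bisect_right)
--     lo, hi = 0, len(pairs)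
--     while lo < hi:
--         mid = (lo + hi) // 2
--         if total < pairs[mid][1]:
--             hi = mid
--         else:
--             lo = mid + 1
--     k = lo
--     if k == 0:
--         stage, low, high = pairs[0][0], 0, pairs[0][1]
--     else:
--         stage, low = pairs[k - 1]
--         high = pairs[k][1] if k < len(pairs) else low
--     denom = max(1, high - low)
--     pct = max(0, min(100, (total - low) * 100 // denom))
--     return stage, low, high, pct
-- ===== Notes on version B (the rewrite author's own statement) =====
-- stated objective: idiomatic
-- what changed: The stateful linear scan with break (threading stage/low/high through the loop, peeking at pairs[i+1]) is replaced by a bisect_right-style binary search over the sorted thresholds followed by pure index arithmetic on k; B keeps the same sort and clamp formula.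
import Mathlib
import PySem

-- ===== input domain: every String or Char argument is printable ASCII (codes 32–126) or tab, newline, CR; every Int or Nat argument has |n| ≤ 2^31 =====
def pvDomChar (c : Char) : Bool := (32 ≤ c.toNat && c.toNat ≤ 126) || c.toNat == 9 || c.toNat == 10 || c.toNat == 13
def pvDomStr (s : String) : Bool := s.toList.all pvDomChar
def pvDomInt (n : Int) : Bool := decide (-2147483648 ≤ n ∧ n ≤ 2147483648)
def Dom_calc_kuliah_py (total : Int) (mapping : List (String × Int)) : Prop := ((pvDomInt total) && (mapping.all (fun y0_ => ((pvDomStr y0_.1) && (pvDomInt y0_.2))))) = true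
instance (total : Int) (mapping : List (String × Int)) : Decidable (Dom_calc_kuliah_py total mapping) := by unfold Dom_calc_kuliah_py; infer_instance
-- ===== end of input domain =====

-- B replaces A's stateful scan-with-break by a bisect_right-style binary search plus index
-- arithmetic on the sorted pairs (same sort, same clamped percentage formula): more idiomatic.


-- ===== PORT A =====
-- A's scan loop: 'break' becomes a plain return, pairs[i+1] is the head of the rest of the list
def pvLoopA (total : Int) : List (String × Int) → String → Int → Int → String × Int × Int
  | [], stage, low, high => (stage, low, high)
  | (name, thr) :: rest, _stage, _low, _high =>
    if total ≥ thr then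
      pvLoopA total rest name thr (match rest with | [] => thr | (_, t') :: _ => t')
    else (_stage, _low, thr)

def calc_kuliah_py (total : Int) (mapping : List (String × Int)) : String × Int × Int × Int :=
  -- the pairs-building loop: int(thr) is the identity on an int value and never raises
  let pairs0 := mapping.foldl (fun acc p => acc ++ [p]) []
  let pairs := PySem.List.sorted pairs0 (fun p => p.2)
  match pairs with
  | [] => ("", 0, 0, 0)   -- Python raises IndexError at pairs[0]; excluded by Pre_
  | (n0, t0) :: _ =>
    let r := pvLoopA total pairs n0 0 t0
    let denom := max 1 (r.2.2 - r.2.1)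
    -- int((total - low) * 100 / denom): float division then int(); PySem.Int.truncdiv is exact here (|numerator| < 2^53 on Dom)
    let pct := max 0 (min 100 (PySem.Int.truncdiv ((total - r.2.1) * 100) denom))
    (r.1, r.2.1, r.2.2, pct)

-- ===== PORT B =====
-- B's hand-written while-loop binary search (bisect_right on the snd components).
-- The fuel argument only makes the loop total: hi - lo strictly decreases each
-- iteration, so fuel = initial hi - lo (= pairs.length) is never exhausted.
def pvBisectB (pairs : List (String × Int)) (total : Int) : Nat → Nat → Nat → Nat
  | 0, lo, _hi => lo
  | fuel + 1, lo, hi =>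
    if lo < hi then
      let mid := (lo + hi) / 2
      if total < (pairs.getD mid ("", 0)).2 then pvBisectB pairs total fuel lo mid
      else pvBisectB pairs total fuel (mid + 1) hi
    else lo

def calc_kuliah_py_alt (total : Int) (mapping : List (String × Int)) : String × Int × Int × Int :=
  let pairs := PySem.List.sorted mapping (fun p => p.2)
  match pairs with
  | [] => ("", 0, 0, 0)   -- Python raises IndexError at pairs[0]; excluded by Pre_
  | (n0, t0) :: _ =>
    let k := pvBisectB pairs total pairs.length 0 pairs.length
    let slh : String × Int × Int :=
      if k = 0 then (n0, 0, t0)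
      else
        let p := pairs.getD (k - 1) ("", 0)
        (p.1, p.2, if k < pairs.length then (pairs.getD k ("", 0)).2 else p.2)
    let denom := max 1 (slh.2.2 - slh.2.1)
    let pct := max 0 (min 100 (PySem.Int.floordiv ((total - slh.2.1) * 100) denom))
    (slh.1, slh.2.1, slh.2.2, pct)

-- ===== PRECONDITION & SPEC =====
-- Pre_ excludes only the empty mapping, on which A (and B) raise IndexError at pairs[0].
def Pre_calc_kuliah_py (total : Int) (mapping : List (String × Int)) : Prop := mapping ≠ []
instance (total : Int) (mapping : List (String × Int)) : Decidable (Pre_calc_kuliah_py total mapping) := by unfold Pre_calc_kuliah_py; infer_instance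

def pvWitness_calc_kuliah_py : Int × (List (String × Int)) := (7, [("tk", 0), ("sd", 5)])

def Spec_calc_kuliah_py (total : Int) (mapping : List (String × Int)) (out : String × Int × Int × Int) : Prop := out = calc_kuliah_py_alt total mapping
instance (total : Int) (mapping : List (String × Int)) (out : String × Int × Int × Int) : Decidable (Spec_calc_kuliah_py total mapping out) := by unfold Spec_calc_kuliah_py; infer_instance

-- ===== CLAIM (what is proved, stated in full; the proofs are below) =====
def Claim_equal_calc_kuliah_py : Prop := ∀ (total : Int) (mapping : List (String × Int)), Dom_calc_kuliah_py total mapping → Pre_calc_kuliah_py total mapping → Spec_calc_kuliah_py total mapping (calc_kuliah_py total mapping)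

-- ===== LEMMAS AND PROOFS =====

-- the binary search maintains: everything left of lo is ≤ total, everything right of hi is > total
lemma pvBisectB_inv (pairs : List (String × Int)) (total : Int)
    (hs : pairs.Pairwise (fun a b => a.2 ≤ b.2)) (fuel lo hi : Nat)
    (hf : hi - lo ≤ fuel)
    (h1 : lo ≤ hi) (h2 : hi ≤ pairs.length)
    (h3 : ∀ j, j < lo → (pairs.getD j ("", 0)).2 ≤ total)
    (h4 : ∀ j, hi ≤ j → j < pairs.length → total < (pairs.getD j ("", 0)).2) :
    pvBisectB pairs total fuel lo hi ≤ pairs.length ∧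
    (∀ j, j < pvBisectB pairs total fuel lo hi → (pairs.getD j ("", 0)).2 ≤ total) ∧
    (∀ j, pvBisectB pairs total fuel lo hi ≤ j → j < pairs.length → total < (pairs.getD j ("", 0)).2) := by
  have hmono : ∀ p q : Nat, p ≤ q → q < pairs.length →
      (pairs.getD p ("", 0)).2 ≤ (pairs.getD q ("", 0)).2 := by
    intro p q hpq hq
    rcases eq_or_lt_of_le hpq with rfl | hlt
    · exact le_refl _
    · rw [List.getD_eq_getElem _ _ (lt_of_le_of_lt hpq hq), List.getD_eq_getElem _ _ hq]
      exact (List.pairwise_iff_getElem.mp hs) p q _ hq hlt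
  induction fuel generalizing lo hi with
  | zero =>
    simp only [pvBisectB]
    exact ⟨by omega, h3, fun j hj => h4 j (by omega)⟩
  | succ n ih =>
    rw [pvBisectB]
    by_cases hlt : lo < hi
    · have hmidlt : (lo + hi) / 2 < hi := by omega
      have hmidge : lo ≤ (lo + hi) / 2 := by omega
      by_cases hc : total < (pairs.getD ((lo + hi) / 2) ("", 0)).2
      · simp only [if_pos hlt, if_pos hc]
        exact ih lo ((lo + hi) / 2) (by omega) hmidge (le_of_lt (lt_of_lt_of_le hmidlt h2)) h3
          (fun j hj hjl => lt_of_lt_of_le hc (hmono _ _ hj hjl))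
      · simp only [if_pos hlt, if_neg hc]
        rw [not_lt] at hc
        exact ih ((lo + hi) / 2 + 1) hi (by omega) (by omega) h2
          (fun j hj => by
            rcases Nat.lt_succ_iff_lt_or_eq.mp hj with hj' | rfl
            · rcases Nat.lt_or_ge j lo with h | h
              · exact h3 j h
              · exact le_trans (hmono j ((lo + hi) / 2) (by omega) (lt_of_lt_of_le hmidlt h2)) hc
            · exact hc)
          h4
    · simp only [if_neg hlt]
      exact ⟨by omega, h3, fun j hj => h4 j (by omega)⟩

-- a boundary index on the predicate determines countP
lemma pv_countP_eq_of_boundary (total : Int) (l : List (String × Int)) (r : Nat) (hr : r ≤ l.length)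
    (h1 : ∀ j, j < r → (l.getD j ("", 0)).2 ≤ total)
    (h2 : ∀ j, r ≤ j → j < l.length → total < (l.getD j ("", 0)).2) :
    l.countP (fun p => decide (p.2 ≤ total)) = r := by
  induction l generalizing r with
  | nil => simp at hr ⊢; omega
  | cons x xs ih =>
    cases r with
    | zero =>
      rw [List.countP_eq_zero]
      intro p hp
      rcases List.mem_iff_getElem.mp hp with ⟨j, hj, rfl⟩
      have := h2 j (Nat.zero_le _) hj
      rw [List.getD_eq_getElem _ _ hj] at this
      simpa using this
    | succ r' =>
      have hx : x.2 ≤ total := by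
        have := h1 0 (Nat.succ_pos _)
        simpa using this
      rw [List.countP_cons_of_pos (by simpa using hx)]
      have := ih r' (by simpa using hr)
        (fun j hj => by simpa using h1 (j + 1) (by omega))
        (fun j hj hjl => by simpa using h2 (j + 1) (by omega) (by simpa using Nat.succ_lt_succ hjl))
      omega

-- characterisation of A's scan on a sorted list, in terms of k = countP (≤ total)
lemma pvLoopA_eq (total : Int) (l : List (String × Int))
    (hs : l.Pairwise (fun a b => a.2 ≤ b.2)) (s : String) (low high : Int) :
    pvLoopA total l s low high =
      (if l.countP (fun p => decide (p.2 ≤ total)) = 0 then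
        (s, low, match l with | [] => high | (_, t) :: _ => t)
      else
        ((l.getD (l.countP (fun p => decide (p.2 ≤ total)) - 1) ("", 0)).1,
         (l.getD (l.countP (fun p => decide (p.2 ≤ total)) - 1) ("", 0)).2,
         if l.countP (fun p => decide (p.2 ≤ total)) < l.length then
           (l.getD (l.countP (fun p => decide (p.2 ≤ total))) ("", 0)).2
         else (l.getD (l.countP (fun p => decide (p.2 ≤ total)) - 1) ("", 0)).2)) := by
  induction l generalizing s low high with
  | nil => simp [pvLoopA]
  | cons x xs ih =>
    obtain ⟨n, t⟩ := x
    rw [List.pairwise_cons] at hs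
    by_cases hts : t ≤ total
    · have hcnt : (((n, t) :: xs).countP (fun p => decide (p.2 ≤ total)))
          = xs.countP (fun p => decide (p.2 ≤ total)) + 1 := by
        rw [List.countP_cons_of_pos (by simpa using hts)]
      rw [hcnt]
      simp only [pvLoopA, ge_iff_le, if_pos hts]
      rw [ih hs.2]
      by_cases hk0 : xs.countP (fun p => decide (p.2 ≤ total)) = 0
      · rw [if_pos hk0, hk0]
        cases xs with
        | nil => simp
        | cons y ys => simp
      · rw [if_neg hk0]
        have hk1 : 1 ≤ xs.countP (fun p => decide (p.2 ≤ total)) := Nat.one_le_iff_ne_zero.mpr hk0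
        simp only [if_neg (by omega : ¬ xs.countP (fun p => decide (p.2 ≤ total)) + 1 = 0)]
        have e1 : xs.countP (fun p => decide (p.2 ≤ total)) + 1 - 1
            = (xs.countP (fun p => decide (p.2 ≤ total)) - 1) + 1 := by omega
        have e2 : ∀ m : Nat, (((n, t) :: xs).getD (m + 1) ("", 0)) = xs.getD m ("", 0) := by
          intro m; simp
        rw [e1, e2]
        by_cases hlen : xs.countP (fun p => decide (p.2 ≤ total)) < xs.length
        · rw [if_pos hlen, if_pos (by simpa using Nat.succ_lt_succ hlen), e2]
        · rw [if_neg hlen, if_neg (by simp only [List.length_cons]; omega)]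
    · have hcnt : (((n, t) :: xs).countP (fun p => decide (p.2 ≤ total))) = 0 := by
        rw [List.countP_eq_zero]
        intro p hp
        rcases List.mem_cons.mp hp with rfl | hmem
        · simpa using hts
        · have : t ≤ p.2 := hs.1 p hmem
          simp only [decide_eq_true_eq]; omega
      rw [hcnt]
      simp [pvLoopA, hts]

-- the clamp to [0,100] erases the trunc-vs-floor difference of the two divisions (denominator ≥ 1)
lemma pv_clamp_trunc_eq_floor (a d : Int) (hd : 1 ≤ d) :
    max 0 (min 100 (PySem.Int.truncdiv a d)) = max 0 (min 100 (PySem.Int.floordiv a d)) := by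
  rw [PySem.Int.floordiv_eq_ediv_of_pos (by omega)]
  show max 0 (min 100 (a.tdiv d)) = max 0 (min 100 (a / d))
  by_cases ha : 0 ≤ a
  · rw [Int.tdiv_eq_ediv_of_nonneg ha]
  · have h1 : a.tdiv d ≤ 0 := by
      have h := Int.tdiv_nonneg (by omega : (0:Int) ≤ -a) (by omega : (0:Int) ≤ d)
      rw [Int.neg_tdiv] at h; omega
    have h2 : a / d ≤ 0 := by
      have h := Int.ediv_le_ediv (by omega : (0:Int) < d) (by omega : a ≤ (0:Int))
      simpa using h
    omega

-- pvLoopA_eq for a cons cell: the carried initial high collapses to the head threshold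
lemma pvLoopA_eq_cons (total : Int) (n : String) (t : Int) (xs : List (String × Int))
    (hs : ((n, t) :: xs).Pairwise (fun a b => a.2 ≤ b.2)) (s : String) (low high : Int) :
    pvLoopA total ((n, t) :: xs) s low high =
      (if ((n, t) :: xs).countP (fun p => decide (p.2 ≤ total)) = 0 then
        (s, low, t)
      else
        ((((n, t) :: xs).getD (((n, t) :: xs).countP (fun p => decide (p.2 ≤ total)) - 1) ("", 0)).1,
         (((n, t) :: xs).getD (((n, t) :: xs).countP (fun p => decide (p.2 ≤ total)) - 1) ("", 0)).2,
         if ((n, t) :: xs).countP (fun p => decide (p.2 ≤ total)) < ((n, t) :: xs).length then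
           (((n, t) :: xs).getD (((n, t) :: xs).countP (fun p => decide (p.2 ≤ total))) ("", 0)).2
         else (((n, t) :: xs).getD (((n, t) :: xs).countP (fun p => decide (p.2 ≤ total)) - 1) ("", 0)).2)) := by
  rw [pvLoopA_eq total ((n, t) :: xs) hs s low high]

-- ===== VERDICT (by name: the statement is the Claim_ definition above) =====
theorem calc_kuliah_py_spec : Claim_equal_calc_kuliah_py := by
  intro total mapping _hdom hpre
  unfold Spec_calc_kuliah_py calc_kuliah_py calc_kuliah_py_alt
  simp only [PySem.List.foldl_append_singleton, List.nil_append]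
  have hpw := PySem.List.sorted_pairwise mapping (fun p : String × Int => p.2)
  obtain ⟨n0, t0, rest, hsp⟩ : ∃ n0 t0 rest,
      PySem.List.sorted mapping (fun p => p.2) false = (n0, t0) :: rest := by
    cases h : PySem.List.sorted mapping (fun p => p.2) false with
    | nil => exact absurd ((PySem.List.sorted_eq_nil_iff mapping _ false).mp h) hpre
    | cons p r =>
      obtain ⟨a, b⟩ := p
      exact ⟨a, b, r, rfl⟩
  rw [hsp] at hpw
  rw [hsp]
  dsimp only
  have hinv := pvBisectB_inv ((n0, t0) :: rest) total hpw ((n0, t0) :: rest).length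
    0 ((n0, t0) :: rest).length (by omega) (Nat.zero_le _) (le_refl _)
    (fun j hj => absurd hj (Nat.not_lt_zero j)) (fun j hj hjl => absurd hjl (by omega))
  have hcnt := pv_countP_eq_of_boundary total ((n0, t0) :: rest)
    (pvBisectB ((n0, t0) :: rest) total ((n0, t0) :: rest).length 0 ((n0, t0) :: rest).length)
    hinv.1 hinv.2.1 hinv.2.2
  rw [pvLoopA_eq_cons total n0 t0 rest hpw n0 0 t0, hcnt]
  rw [pv_clamp_trunc_eq_floor _ _ (le_max_left 1 _)]
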